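-- pv_equiv track=rewrite | github.com/risandiro/cs50submissions | test_plates/plates.py | rule_three
-- ===== SOURCE A (Python) =====
-- def rule_three(s):
--     counter = 0
--     for char in range(len(s)):
--         if counter != 1:
--             if s[char].isnumeric():
--                 if s[char] == "0":
--                     return False
--                 counter += 1
--                 continue
--         if counter == 1:
--             if s[char].isnumeric() == False:
--                 return False
--     return True
-- ===== SOURCE B (Python) =====
-- def rule_three(s):
--     # Right-to-left strategy: peel off the maximal numeric suffix of s, then the
--     # plate is valid iff no digit remains in the rest and the suffix does not
--     # start with '0'.
--     rev = s[::-1]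
--     k = 0
--     while k < len(rev) and rev[k].isnumeric():
--         k += 1
--     if any(c.isnumeric() for c in rev[k:]):
--         return False
--     return k == 0 or rev[k-1] != '0'
-- ===== Notes on version B (the rewrite author's own statement) =====
-- stated objective: alternative
-- what changed: Instead of a forward stateful scan, B works right-to-left: it strips the maximal numeric suffix from the reversed string, then the plate is valid iff the remainder contains no digit and the suffix does not start with the zero digit.
import Mathlib
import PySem

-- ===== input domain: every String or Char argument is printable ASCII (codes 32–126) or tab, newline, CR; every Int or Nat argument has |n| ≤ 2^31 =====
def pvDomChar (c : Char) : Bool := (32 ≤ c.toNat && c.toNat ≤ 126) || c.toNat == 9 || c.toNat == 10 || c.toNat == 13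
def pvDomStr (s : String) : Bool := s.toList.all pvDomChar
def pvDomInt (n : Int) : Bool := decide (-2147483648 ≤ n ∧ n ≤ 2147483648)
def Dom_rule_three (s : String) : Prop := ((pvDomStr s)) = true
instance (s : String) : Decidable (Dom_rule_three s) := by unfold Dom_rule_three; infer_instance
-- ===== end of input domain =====

-- B replaces A's forward stateful counter loop by a right-to-left pass: strip the maximal
-- numeric suffix of the reversed string, then check the rest has no digit; objective: alternative.


-- ===== PORT A =====
-- `str.isnumeric` is ported as `PySem.Chars.isdigit`: on the printable-ASCII domain the
-- two coincide (both are exactly '0'..'9' there).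
def ruleThreeLoopA : List Char → Nat → Bool
  | [], _ => true
  | c :: rest, counter =>
    if counter ≠ 1 ∧ PySem.Chars.isdigit c then
      -- the `continue` branch: counter += 1, next iteration
      if c = '0' then false else ruleThreeLoopA rest (counter + 1)
    else
      if counter = 1 ∧ ¬ PySem.Chars.isdigit c then false
      else ruleThreeLoopA rest counter

def rule_three (s : String) : Bool := ruleThreeLoopA s.toList 0

-- ===== PORT B =====
-- B's while loop over `rev = s[::-1]` advances an index past the leading digits of `rev`
-- (= the numeric suffix of s); here the index walk is the structural recursion on the
-- reversed character list, carrying `last` = rev[k-1], the most recently skipped digit.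
-- When the loop stops, `rev[k:]` is the remaining list and the two final checks fire.
def ruleThreeLoopB : List Char → Option Char → Bool
  | [], last => decide (last ≠ some '0')
  | c :: rest, last =>
    if PySem.Chars.isdigit c then ruleThreeLoopB rest (some c)
    else if (c :: rest).any PySem.Chars.isdigit then false
    else decide (last ≠ some '0')

def rule_three_alt (s : String) : Bool := ruleThreeLoopB s.toList.reverse none

-- ===== PRECONDITION & SPEC =====
def Spec_rule_three (s : String) (out : Bool) : Prop := out = rule_three_alt s
instance (s : String) (out : Bool) : Decidable (Spec_rule_three s out) := by unfold Spec_rule_three; infer_instance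

-- ===== CLAIM (what is proved, stated in full; the proofs are below) =====
def Claim_equal_rule_three : Prop := ∀ (s : String), Dom_rule_three s → Spec_rule_three s (rule_three s)

-- ===== LEMMAS AND PROOFS =====

-- closed-form value both loops compute: look at the part of l from the first digit on;
-- if l has no digit the result is `last ≠ '0'` (with A's carried `last` always none).
def ruleThreeSpec (l : List Char) (last : Option Char) : Bool :=
  match l.dropWhile (fun c => !PySem.Chars.isdigit c) with
  | [] => decide (last ≠ some '0')
  | c :: t => decide (c ≠ '0') && t.all PySem.Chars.isdigit

theorem dropWhile_nil_all {l : List Char} (h : l.dropWhile (fun c => !PySem.Chars.isdigit c) = []) :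
    l.all (fun c => !PySem.Chars.isdigit c) = true := by
  induction l with
  | nil => rfl
  | cons c rest ih =>
    rw [List.dropWhile_cons] at h
    by_cases hc : PySem.Chars.isdigit c = true
    · simp [hc] at h
    · rw [if_pos (by simp [hc])] at h
      simp [List.all_cons, hc, ih h]

theorem ruleThreeLoopA_one (l : List Char) : ruleThreeLoopA l 1 = l.all PySem.Chars.isdigit := by
  induction l with
  | nil => rfl
  | cons c rest ih =>
    simp only [ruleThreeLoopA, List.all_cons]
    by_cases h : PySem.Chars.isdigit c = true <;> simp [h, ih]

theorem ruleThreeLoopA_spec (l : List Char) : ruleThreeLoopA l 0 = ruleThreeSpec l none := by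
  induction l with
  | nil => rfl
  | cons c rest ih =>
    by_cases h : PySem.Chars.isdigit c = true
    · simp only [ruleThreeLoopA]
      rw [if_pos ⟨by omega, h⟩]
      unfold ruleThreeSpec
      rw [List.dropWhile_cons_of_neg (by simp [h])]
      by_cases h0 : c = '0'
      · simp [h0]
      · simp [h0, ruleThreeLoopA_one]
    · simp only [ruleThreeLoopA, ruleThreeSpec, List.dropWhile_cons]
      simpa [h, ruleThreeSpec] using ih

theorem ruleThreeLoopB_snoc (l : List Char) (c : Char) (last : Option Char) :
    ruleThreeLoopB (l ++ [c]).reverse last =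
      if PySem.Chars.isdigit c then ruleThreeLoopB l.reverse (some c)
      else if (c :: l.reverse).any PySem.Chars.isdigit then false
      else decide (last ≠ some '0') := by
  simp only [List.reverse_append, List.reverse_singleton, List.singleton_append, ruleThreeLoopB]

theorem dropWhile_append_digit {l : List Char} {c : Char} (hc : PySem.Chars.isdigit c = true) :
    (l ++ [c]).dropWhile (fun x => !PySem.Chars.isdigit x) =
      l.dropWhile (fun x => !PySem.Chars.isdigit x) ++ [c] := by
  induction l with
  | nil => simp [List.dropWhile, hc]
  | cons a rest ih =>
    simp only [List.cons_append, List.dropWhile_cons]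
    by_cases ha : PySem.Chars.isdigit a = true <;> simp [ha, ih]

theorem ruleThreeSpec_snoc_digit (l : List Char) (c : Char) (last : Option Char)
    (hc : PySem.Chars.isdigit c = true) :
    ruleThreeSpec (l ++ [c]) last = ruleThreeSpec l (some c) := by
  unfold ruleThreeSpec
  rw [dropWhile_append_digit hc]
  cases hd : l.dropWhile (fun x => !PySem.Chars.isdigit x) with
  | nil => simp
  | cons c0 t =>
    have hall : PySem.Chars.isdigit c0 = true := by
      have := List.head_dropWhile_not (p := fun x => !PySem.Chars.isdigit x) (l := l)
      rw [hd] at this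
      simpa using this (by simp)
    simp [List.all_append, hc]

theorem any_iff_dropWhile {l : List Char} :
    l.any PySem.Chars.isdigit = false ↔ l.dropWhile (fun c => !PySem.Chars.isdigit c) = [] := by
  constructor
  · intro h
    induction l with
    | nil => rfl
    | cons a rest ih =>
      simp only [List.any_cons, Bool.or_eq_false_iff] at h
      simp [List.dropWhile_cons, h.1, ih h.2]
  · intro h
    have := dropWhile_nil_all h
    simp only [List.all_eq_true] at this
    simp only [List.any_eq_false]
    intro x hx
    simpa using this x hx

theorem ruleThreeLoopB_spec (l : List Char) (last : Option Char) :
    ruleThreeLoopB l.reverse last = ruleThreeSpec l last := by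
  induction l using List.reverseRecOn generalizing last with
  | nil => rfl
  | append_singleton l c ih =>
    rw [ruleThreeLoopB_snoc]
    by_cases hc : PySem.Chars.isdigit c = true
    · rw [if_pos hc, ih, ruleThreeSpec_snoc_digit l c last hc]
    · rw [if_neg hc]
      have hany : (c :: l.reverse).any PySem.Chars.isdigit = l.any PySem.Chars.isdigit := by
        simp [hc]
      rw [hany]
      unfold ruleThreeSpec
      cases ha : l.any PySem.Chars.isdigit with
      | false =>
        have hd : l.dropWhile (fun x => !PySem.Chars.isdigit x) = [] := any_iff_dropWhile.mp ha
        have hd2 : (l ++ [c]).dropWhile (fun x => !PySem.Chars.isdigit x) = [] := by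
          apply any_iff_dropWhile.mp
          simp [List.any_append, ha, hc]
        simp [hd2]
      | true =>
        have hd : l.dropWhile (fun x => !PySem.Chars.isdigit x) ≠ [] := by
          intro h; rw [any_iff_dropWhile.mpr h] at ha; exact absurd ha (by simp)
        cases hdc : l.dropWhile (fun x => !PySem.Chars.isdigit x) with
        | nil => exact absurd hdc hd
        | cons c0 t =>
          have hdd : (l ++ [c]).dropWhile (fun x => !PySem.Chars.isdigit x) = c0 :: (t ++ [c]) := by
            rw [List.dropWhile_append]
            simp [hdc]
          simp [hdd, List.all_append, hc]

-- ===== VERDICT (by name: the statement is the Claim_ definition above) =====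
theorem rule_three_spec : Claim_equal_rule_three := by
  intro s _
  unfold Spec_rule_three rule_three rule_three_alt
  rw [ruleThreeLoopB_spec, ruleThreeLoopA_spec]
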